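-- pv_equiv track=rewrite | github.com/alch3mistdev/finite-pomdp-abstraction | experiments/pomdp_core.py | all_histories
-- ===== SOURCE A (Python) =====
-- from typing import Dict, Iterable, List, Mapping, Sequence, Tuple
--
-- History = Tuple[int, ...]
--
-- def all_histories(num_observations: int, horizon: int) -> Dict[int, List[History]]:
--     """Enumerate all observation histories grouped by depth."""
--     histories: Dict[int, List[History]] = {0: [()]}
--     for depth in range(1, horizon + 1):
--         prev = histories[depth - 1]
--         curr: List[History] = []
--         for h in prev:
--             for obs in range(num_observations):
--                 curr.append(h + (obs,))
--         histories[depth] = curr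
--     return histories
-- ===== SOURCE B (Python) =====
-- def all_histories(num_observations, horizon):
--     """Enumerate all observation histories grouped by depth."""
--     def tuples(depth):
--         # all length-`depth` tuples over range(num_observations), lexicographic,
--         # built head-first (prepend), computed independently for each depth
--         if depth == 0:
--             return [()]
--         return [(o,) + rest for o in range(num_observations)
--                 for rest in tuples(depth - 1)]
--     histories = {0: [()]}
--     for depth in range(1, horizon + 1):
--         histories[depth] = tuples(depth)
--     return histories
-- ===== Notes on version B (the rewrite author's own statement) =====
-- stated objective: alternative
-- what changed: Each depth's history list is computed independently by a recursive head-first cartesian product (prepending the new observation) instead of extending the previously stored depth's list tuple-by-tuple with appended observations; no layer is read back from the dict.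
import Mathlib
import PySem

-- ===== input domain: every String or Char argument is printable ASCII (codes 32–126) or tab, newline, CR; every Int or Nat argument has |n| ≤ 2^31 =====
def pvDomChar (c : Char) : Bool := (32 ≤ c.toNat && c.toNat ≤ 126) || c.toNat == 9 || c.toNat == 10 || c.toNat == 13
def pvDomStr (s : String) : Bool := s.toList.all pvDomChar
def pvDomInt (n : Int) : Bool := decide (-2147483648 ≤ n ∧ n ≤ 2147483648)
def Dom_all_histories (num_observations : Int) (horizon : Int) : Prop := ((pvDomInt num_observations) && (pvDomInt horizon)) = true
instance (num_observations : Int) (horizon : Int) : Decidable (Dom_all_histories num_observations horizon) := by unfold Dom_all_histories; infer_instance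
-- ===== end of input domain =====

-- B recomputes each depth's histories independently by a head-first recursive cartesian
-- product instead of extending the previous depth's stored list (objective: alternative).

-- ===== PORT A =====
-- histories = {0: [()]}; for depth in range(1, horizon+1): extend histories[depth-1]
-- (the dict lookup histories[depth-1] cannot raise KeyError: the key was just inserted,
--  so .getD … [] is exact)
def all_histories (num_observations : Int) (horizon : Int) : List (Int × List (List Int)) :=
  let init : PySem.Dict Int (List (List Int)) := PySem.Dict.empty.insert 0 [[]]
  let final := (PySem.List.pyRange 1 (horizon + 1) 1).foldl
    (fun d depth =>
      let prev := d.getD (depth - 1) []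
      let curr := prev.foldl
        (fun curr h =>
          (PySem.List.pyRange 0 num_observations 1).foldl
            (fun curr obs => curr ++ [h ++ [obs]]) curr) []
      d.insert depth curr) init
  final.items

-- ===== PORT B =====
-- tuples(depth): [(o,)+rest for o in range(num_observations) for rest in tuples(depth-1)];
-- tuples is only called with depth ≥ 0, so Nat recursion is exact
def pvTuples (num_observations : Int) : Nat → List (List Int)
  | 0 => [[]]
  | d + 1 => (PySem.List.pyRange 0 num_observations 1).flatMap
      (fun o => (pvTuples num_observations d).map (fun rest => o :: rest))

def all_histories_alt (num_observations : Int) (horizon : Int) : List (Int × List (List Int)) :=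
  let init : PySem.Dict Int (List (List Int)) := PySem.Dict.empty.insert 0 [[]]
  let final := (PySem.List.pyRange 1 (horizon + 1) 1).foldl
    (fun d depth => d.insert depth (pvTuples num_observations depth.toNat)) init
  final.items

-- ===== PRECONDITION & SPEC =====
def Spec_all_histories (num_observations : Int) (horizon : Int) (out : List (Int × List (List Int))) : Prop := out = all_histories_alt num_observations horizon
instance (num_observations : Int) (horizon : Int) (out : List (Int × List (List Int))) : Decidable (Spec_all_histories num_observations horizon out) := by unfold Spec_all_histories; infer_instance

-- ===== CLAIM (what is proved, stated in full; the proofs are below) =====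
def Claim_equal_all_histories : Prop := ∀ (num_observations : Int) (horizon : Int), Dom_all_histories num_observations horizon → Spec_all_histories num_observations horizon (all_histories num_observations horizon)

-- ===== LEMMAS AND PROOFS =====

-- the common normal form of both dicts after processing depths 1..k
def pvLayers (n : Int) (k : Nat) : PySem.Dict Int (List (List Int)) :=
  PySem.Dict.mk ((List.range (k + 1)).map (fun d : Nat => ((d : Int), pvTuples n d)))

lemma pvLayers_zero (n : Int) : pvLayers n 0 = PySem.Dict.empty.insert 0 [[]] := by
  rfl

lemma pvLayers_keys (n : Int) (k : Nat) :
    (pvLayers n k).keys = (List.range (k + 1)).map (fun d : Nat => (d : Int)) := by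
  show ((List.range (k + 1)).map (fun d : Nat => ((d : Int), pvTuples n d))).map (·.1) = _
  rw [List.map_map]
  rfl

lemma pvLayers_keys_nodup (n : Int) (k : Nat) : (pvLayers n k).keys.Nodup := by
  rw [pvLayers_keys]
  exact List.nodup_range.map Nat.cast_injective

lemma pvLayers_not_contains (n : Int) (k : Nat) :
    (pvLayers n k).contains ((k : Int) + 1) = false := by
  rw [PySem.Dict.contains_eq_decide_mem_keys, pvLayers_keys]
  simp only [decide_eq_false_iff_not, List.mem_map, List.mem_range]
  rintro ⟨d, hd, hde⟩
  omega

lemma pvLayers_getD (n : Int) (k : Nat) :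
    (pvLayers n k).getD (k : Int) [] = pvTuples n k := by
  apply PySem.Dict.getD_of_mem_items
  · exact List.mem_map.mpr ⟨k, by simp, rfl⟩
  · exact pvLayers_keys_nodup n k

lemma pvLayers_insert (n : Int) (k : Nat) (v : List (List Int)) :
    (pvLayers n k).insert ((k : Int) + 1) v =
      PySem.Dict.mk ((List.range (k + 1)).map (fun d : Nat => ((d : Int), pvTuples n d)) ++ [((k : Int) + 1, v)]) := by
  apply PySem.Dict.ext
  rw [PySem.Dict.items_insert_of_not_contains _ _ (pvLayers_not_contains n k)]
  rfl

-- A's extension of depth d's list (append one observation) is B's tuples(d+1)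
lemma pvTuples_step (n : Int) (d : Nat) :
    (pvTuples n d).flatMap
      (fun h => (PySem.List.pyRange 0 n 1).map (fun o => h ++ [o])) = pvTuples n (d + 1) := by
  induction d with
  | zero =>
    have h1 : ∀ L : List Int, L.flatMap (fun o => [[o]]) = L.map (fun o => [o]) := by
      intro L; induction L with
      | nil => rfl
      | cons a t ih => simp [ih]
    simp [pvTuples, h1]
  | succ d ih =>
    show ((PySem.List.pyRange 0 n 1).flatMap _).flatMap _ = _
    rw [List.flatMap_assoc]
    have inner : ∀ o : Int,
        ((pvTuples n d).map (fun rest => o :: rest)).flatMap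
          (fun h => (PySem.List.pyRange 0 n 1).map (fun o2 => h ++ [o2]))
        = (pvTuples n (d + 1)).map (fun rest => o :: rest) := by
      intro o
      rw [List.flatMap_map, ← ih, List.map_flatMap]
      congr 1; funext h
      rw [List.map_map]; rfl
    calc (PySem.List.pyRange 0 n 1).flatMap
          (fun o => ((pvTuples n d).map (fun rest => o :: rest)).flatMap
            (fun h => (PySem.List.pyRange 0 n 1).map (fun o2 => h ++ [o2])))
        = (PySem.List.pyRange 0 n 1).flatMap
            (fun o => (pvTuples n (d + 1)).map (fun rest => o :: rest)) := by
          simp only [inner]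
      _ = pvTuples n (d + 2) := rfl

-- A's inner double loop is exactly one flatMap layer
lemma pvCurr_eq (n : Int) (prev : List (List Int)) :
    prev.foldl (fun curr h =>
        (PySem.List.pyRange 0 n 1).foldl (fun curr obs => curr ++ [h ++ [obs]]) curr) []
      = prev.flatMap (fun h => (PySem.List.pyRange 0 n 1).map (fun o => h ++ [o])) := by
  suffices hgen : ∀ (prev acc : List (List Int)),
      prev.foldl (fun curr h =>
          (PySem.List.pyRange 0 n 1).foldl (fun curr obs => curr ++ [h ++ [obs]]) curr) acc
        = acc ++ prev.flatMap (fun h => (PySem.List.pyRange 0 n 1).map (fun o => h ++ [o])) by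
    simpa using hgen prev []
  intro prev
  induction prev with
  | nil => intro acc; simp
  | cons h t ih =>
    intro acc
    rw [List.foldl_cons, ih, PySem.List.foldl_append_singleton_eq_map]
    simp

-- A's loop through depths 1..k lands on the normal form
lemma pvLoopA (n : Int) (k : Nat) :
    (PySem.List.pyRange 1 ((k : Int) + 1) 1).foldl
      (fun d depth =>
        d.insert depth ((d.getD (depth - 1) []).foldl
          (fun curr h =>
            (PySem.List.pyRange 0 n 1).foldl (fun curr obs => curr ++ [h ++ [obs]]) curr) []))
      (PySem.Dict.empty.insert 0 [[]]) = pvLayers n k := by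
  induction k with
  | zero =>
    rw [PySem.List.pyRange_one_eq_nil (a := 1) (b := ((0 : Nat) : Int) + 1) (by omega)]
    exact (pvLayers_zero n).symm
  | succ k ih =>
    have hc : (((k + 1 : Nat) : Int)) + 1 = ((k : Int) + 1) + 1 := by push_cast; ring
    rw [hc, PySem.List.pyRange_one_succ_right (by omega), List.foldl_append, ih]
    simp only [List.foldl_cons, List.foldl_nil]
    have hdm : ((k : Int) + 1) - 1 = (k : Int) := by ring
    rw [hdm, pvLayers_getD, pvCurr_eq, pvTuples_step, pvLayers_insert]
    show PySem.Dict.mk _ = PySem.Dict.mk _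
    congr 1
    conv_rhs => rw [List.range_succ, List.map_append]
    rfl

-- B's loop through depths 1..k lands on the same normal form
lemma pvLoopB (n : Int) (k : Nat) :
    (PySem.List.pyRange 1 ((k : Int) + 1) 1).foldl
      (fun d depth => d.insert depth (pvTuples n depth.toNat))
      (PySem.Dict.empty.insert 0 [[]]) = pvLayers n k := by
  induction k with
  | zero =>
    rw [PySem.List.pyRange_one_eq_nil (a := 1) (b := ((0 : Nat) : Int) + 1) (by omega)]
    exact (pvLayers_zero n).symm
  | succ k ih =>
    have hc : (((k + 1 : Nat) : Int)) + 1 = ((k : Int) + 1) + 1 := by push_cast; ring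
    rw [hc, PySem.List.pyRange_one_succ_right (by omega), List.foldl_append, ih]
    simp only [List.foldl_cons, List.foldl_nil]
    rw [show ((k : Int) + 1).toNat = k + 1 from by omega, pvLayers_insert]
    show PySem.Dict.mk _ = PySem.Dict.mk _
    congr 1
    conv_rhs => rw [List.range_succ, List.map_append]
    rfl

-- ===== VERDICT (by name: the statement is the Claim_ definition above) =====
theorem all_histories_spec : Claim_equal_all_histories := by
  intro n horizon _
  simp only [Spec_all_histories, all_histories, all_histories_alt]
  by_cases hh : 0 ≤ horizon
  · have hk : horizon = ((horizon.toNat : Int)) := by omega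
    rw [hk, pvLoopA n horizon.toNat, pvLoopB n horizon.toNat]
  · rw [show PySem.List.pyRange 1 (horizon + 1) 1 = [] from PySem.List.pyRange_one_eq_nil (by omega)]
    rfl
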